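-- pv_equiv track=rewrite | github.com/avidLearnerInProgress/cf-octo-journey | 1144a.py | diverse_string
-- ===== SOURCE A (Python) =====
-- from collections import Counter
--
-- def diverse_string(x):
--     if x is None: return "No"
--     if len(x) == 1: return "Yes"
--     sx = sorted(x)
--     flag1, flag2 = True, True
--     for i in range(1, len(sx)):
--         if abs(ord(sx[i-1]) - ord(sx[i])) > 1:
--             flag1 = False
--
--     sxc = Counter(sx)
--     val_list = list(sxc.values())
--     for ele in val_list:
--         if ele > 1:
--             flag2 = False
--
--     if flag1 and flag2:
--         return "Yes"
--     else:
--         return "No"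
-- ===== SOURCE B (Python) =====
-- def diverse_string(x):
--     if x is None:
--         return "No"
--     if len(x) <= 1:
--         return "Yes"
--     if len(set(x)) != len(x):
--         return "No"
--     return "Yes" if ord(max(x)) - ord(min(x)) == len(x) - 1 else "No"
-- ===== Notes on version B (the rewrite author's own statement) =====
-- stated objective: faster
-- what changed: A sorts the string, scans adjacent pairs for code gaps, then builds a Counter and scans its values for duplicates; B replaces all of that by a closed-form test: the characters are pairwise distinct (len(set(x)) == len(x)) and the max and min character codes span exactly len(x)-1.
import Mathlib
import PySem

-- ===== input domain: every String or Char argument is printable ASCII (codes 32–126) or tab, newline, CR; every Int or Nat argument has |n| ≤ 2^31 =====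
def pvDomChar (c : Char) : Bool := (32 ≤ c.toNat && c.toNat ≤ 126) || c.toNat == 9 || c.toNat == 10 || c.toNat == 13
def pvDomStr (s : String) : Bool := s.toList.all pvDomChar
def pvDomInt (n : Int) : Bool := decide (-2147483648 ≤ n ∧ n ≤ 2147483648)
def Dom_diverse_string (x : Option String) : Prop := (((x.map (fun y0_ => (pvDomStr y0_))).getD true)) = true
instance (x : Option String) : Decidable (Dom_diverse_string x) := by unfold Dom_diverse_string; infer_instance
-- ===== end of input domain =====

-- B replaces A's sort + adjacent-gap scan + Counter pass by a closed-form test: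
-- distinct characters whose max and min codes span exactly len-1 (objective: faster, measured).

-- ===== PORT A =====
def diverse_string (x : Option String) : String :=
  match x with
  | none => "No"
  | some s =>
    if PySem.Str.len s = 1 then "Yes" else
    let sx := PySem.List.sorted s.toList (fun c => c) false
    let flag1 := (PySem.List.pyRange 1 (sx.length : Int) 1).foldl
      (fun f i =>
        if 1 < |((PySem.List.pyGetD sx (i - 1) 'a').toNat : Int)
                 - ((PySem.List.pyGetD sx i 'a').toNat : Int)| then false else f) true
    let sxc := PySem.Dict.counter sx
    let val_list := sxc.values
    let flag2 := val_list.foldl (fun f ele => if 1 < ele then false else f) true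
    if flag1 && flag2 then "Yes" else "No"

-- ===== PORT B =====
def diverse_string_alt (x : Option String) : String :=
  match x with
  | none => "No"
  | some s =>
    if PySem.Str.len s ≤ 1 then "Yes"
    else if ((PySem.Set.len (PySem.Set.ofList s.toList) : Int) ≠ PySem.Str.len s) then "No"
    else
      match PySem.List.max? s.toList (fun c => c), PySem.List.min? s.toList (fun c => c) with
      | some mx, some mn =>
        if ((mx.toNat : Int) - (mn.toNat : Int)) = PySem.Str.len s - 1 then "Yes" else "No"
      | _, _ => "No"   -- unreachable: the string is nonempty here

-- ===== PRECONDITION & SPEC =====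
def Spec_diverse_string (x : Option String) (out : String) : Prop := out = diverse_string_alt x
instance (x : Option String) (out : String) : Decidable (Spec_diverse_string x out) := by unfold Spec_diverse_string; infer_instance

-- ===== CLAIM (what is proved, stated in full; the proofs are below) =====
def Claim_equal_diverse_string : Prop := ∀ (x : Option String), Dom_diverse_string x → Spec_diverse_string x (diverse_string x)

-- ===== LEMMAS AND PROOFS =====

-- A's 'set flag to False on a hit' fold over a list
theorem foldl_flag {a : Type} (p : a → Prop) [DecidablePred p] :
    ∀ (l : List a) (i : Bool),
      l.foldl (fun f x => if p x then false else f) i = (i && decide (∀ x ∈ l, ¬ p x)) := by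
  intro l
  induction l with
  | nil => intro i; simp
  | cons y t ih =>
    intro i
    rw [List.foldl_cons, ih]
    by_cases hy : p y <;> simp [hy]

theorem ofList_sublist {a : Type} [BEq a] [LawfulBEq a] (cs : List a) :
    (PySem.Set.ofList cs).Sublist cs := by
  induction cs using List.reverseRecOn with
  | nil => simp [PySem.Set.ofList]
  | append_singleton t x ih =>
    have h : PySem.Set.ofList (t ++ [x]) = PySem.Set.add (PySem.Set.ofList t) x := by
      simp [PySem.Set.ofList_eq_foldl, List.foldl_append]
    rw [h]
    unfold PySem.Set.add
    split
    · exact ih.trans (List.sublist_append_left t [x])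
    · exact ih.append (List.Sublist.refl [x])

theorem len_ofList_eq_iff {a : Type} [BEq a] [LawfulBEq a] (cs : List a) :
    (PySem.Set.ofList cs).length = cs.length ↔ cs.Nodup := by
  constructor
  · intro h
    have := (ofList_sublist cs).eq_of_length h
    rw [← this]
    exact PySem.Set.nodup_ofList cs
  · intro h
    rw [PySem.Set.ofList_eq_self_of_nodup cs h]

-- A's Counter pass: the flag2 fold is True exactly on duplicate-free lists
theorem flag2_iff (sx : List Char) :
    ((PySem.Dict.counter sx).values.foldl (fun f ele => if 1 < ele then false else f) true) = true
      ↔ sx.Nodup := by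
  rw [foldl_flag (fun ele : Int => 1 < ele)]
  simp only [Bool.true_and, decide_eq_true_eq]
  rw [PySem.Dict.values_eq_map_keys _ (PySem.Dict.nodup_keys_counter sx) 0,
      PySem.Dict.keys_counter sx]
  constructor
  · intro h
    rw [List.nodup_iff_count_le_one]
    intro c
    by_cases hc : c ∈ sx
    · have := h _ (List.mem_map_of_mem ((PySem.Set.mem_ofList _ _).mpr hc))
      rw [PySem.Dict.getD_counter] at this
      omega
    · simp [List.count_eq_zero_of_not_mem hc]
  · intro h v hv
    obtain ⟨c, _, rfl⟩ := List.mem_map.mp hv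
    rw [PySem.Dict.getD_counter]
    have := List.nodup_iff_count_le_one.mp h c
    omega

-- strictly increasing Nat lists grow at least one per step
theorem steps_lower (ns : List Nat) (h : ns.Pairwise (· < ·)) :
    ∀ (d i : Nat) (hd : i + d < ns.length), ns[i]'(by omega) + d ≤ ns[i + d]'hd := by
  intro d
  induction d with
  | zero => intro i hd; simp
  | succ d ih =>
    intro i hd
    have h1 := ih i (by omega)
    have h2 : ns[i + d]'(by omega) < ns[i + d + 1]'(by omega) :=
      List.pairwise_iff_getElem.mp h (i + d) (i + d + 1) (by omega) (by omega) (by omega)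
    simp only [show i + (d + 1) = i + d + 1 from by omega]
    omega

-- under the adjacent-gap-at-most-one condition they grow at most one per step
theorem steps_upper (ns : List Nat)
    (hstep : ∀ (k : Nat) (hk : k + 1 < ns.length), ns[k + 1]'hk ≤ ns[k]'(by omega) + 1) :
    ∀ (d i : Nat) (hd : i + d < ns.length), ns[i + d]'hd ≤ ns[i]'(by omega) + d := by
  intro d
  induction d with
  | zero => intro i hd; simp
  | succ d ih =>
    intro i hd
    have h1 := ih i (by omega)
    have h2 := hstep (i + d) (by omega)
    simp only [show i + (d + 1) = i + d + 1 from by omega]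
    omega

theorem diverse_string_key (s : String) : diverse_string (some s) = diverse_string_alt (some s) := by
  show (if PySem.Str.len s = 1 then "Yes" else _) = (if PySem.Str.len s ≤ 1 then "Yes" else _)
  rw [PySem.Str.len_eq]
  generalize s.toList = cs
  rcases Nat.lt_or_ge cs.length 2 with hn | hn
  · -- length 0 or 1: both sides answer "Yes"
    by_cases h1 : cs.length = 1
    · rw [if_pos (by exact_mod_cast h1), if_pos (by simp [h1])]
    · have h0 : cs = [] := List.eq_nil_of_length_eq_zero (by omega)
      subst h0
      decide
  · have h1 : ¬ ((cs.length : Int) = 1) := by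
      intro h; have : cs.length = 1 := by exact_mod_cast h
      omega
    have h2 : ¬ ((cs.length : Int) ≤ 1) := by
      intro h; have : cs.length ≤ 1 := by exact_mod_cast h
      omega
    rw [if_neg h1, if_neg h2]
    by_cases hnd : cs.Nodup
    · -- duplicate-free: B's length test passes, A's flag2 is True; compare flag1 with the span test
      have hBtest : ¬ (((PySem.Set.len (PySem.Set.ofList cs)) : Int) ≠ (cs.length : Int)) := by
        have h := (len_ofList_eq_iff cs).mpr hnd
        simp only [ne_eq, not_not]
        show ((PySem.Set.ofList cs).length : Int) = (cs.length : Int)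
        exact_mod_cast h
      rw [if_neg hBtest]
      have hcsne : cs ≠ [] := by intro h; rw [h] at hn; simp at hn
      rcases hmx : PySem.List.max? cs (fun c => c) with _ | mx
      · exact absurd ((PySem.List.max?_eq_none_iff cs _).mp hmx) hcsne
      rcases hmn : PySem.List.min? cs (fun c => c) with _ | mn
      · exact absurd ((PySem.List.min?_eq_none_iff cs _).mp hmn) hcsne
      have hperm : (PySem.List.sorted cs (fun c => c) false).Perm cs := PySem.List.sorted_perm cs _ _
      have hpw : (PySem.List.sorted cs (fun c => c) false).Pairwise (fun a b => a ≤ b) := by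
        have := PySem.List.sorted_pairwise cs (fun c => c)
        simpa using this
      generalize hsx : PySem.List.sorted cs (fun c => c) false = sx at hperm hpw ⊢
      have hlen : sx.length = cs.length := hperm.length_eq
      have hN : 2 ≤ sx.length := by omega
      have hndsx : sx.Nodup := hperm.nodup_iff.mpr hnd
      have hlt : sx.Pairwise (· < ·) := by
        rw [List.pairwise_iff_getElem] at hpw ⊢
        intro i j hi hj hij
        refine lt_of_le_of_ne (hpw i j hi hj hij) (fun he => ?_)
        have := (hndsx.getElem_inj_iff).mp he
        omega
      have hmono : ∀ (i j : Nat) (hi : i < sx.length) (hj : j < sx.length), i < j →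
          (sx[i]'hi).toNat < (sx[j]'hj).toNat := by
        intro i j hi hj hij
        have h := List.pairwise_iff_getElem.mp hlt i j hi hj hij
        rw [Char.lt_def] at h
        exact UInt32.lt_iff_toNat_lt.mp h
      -- the minimum of cs is the head of the sorted list, the maximum its last element
      have hmn0 : mn = sx[0]'(by omega) := by
        have hmem : mn ∈ sx := hperm.mem_iff.mpr (PySem.List.min?_mem hmn)
        obtain ⟨j, hj, hje⟩ := List.mem_iff_getElem.mp hmem
        have hmin : ∀ y ∈ cs, mn ≤ y := by
          have := PySem.List.min?_isMin hmn; simpa using this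
        have h0m : sx[0]'(by omega) ∈ cs := hperm.subset (List.getElem_mem _)
        have hle : sx[0]'(by omega) ≤ sx[j]'hj := by
          rcases Nat.eq_zero_or_pos j with rfl | hjpos
          · exact le_refl _
          · exact le_of_lt (List.pairwise_iff_getElem.mp hlt 0 j (by omega) hj hjpos)
        exact le_antisymm (hmin _ h0m) (hje ▸ hle)
      have hmx0 : mx = sx[sx.length - 1]'(by omega) := by
        have hmem : mx ∈ sx := hperm.mem_iff.mpr (PySem.List.max?_mem hmx)
        obtain ⟨j, hj, hje⟩ := List.mem_iff_getElem.mp hmem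
        have hmax : ∀ y ∈ cs, y ≤ mx := by
          have := PySem.List.max?_isMax hmx; simpa using this
        have hlm : sx[sx.length - 1]'(by omega) ∈ cs := hperm.subset (List.getElem_mem _)
        have hle : sx[j]'hj ≤ sx[sx.length - 1]'(by omega) := by
          rcases Nat.lt_or_ge j (sx.length - 1) with hjl | hjl
          · exact le_of_lt (List.pairwise_iff_getElem.mp hlt j (sx.length - 1) hj (by omega) hjl)
          · have : j = sx.length - 1 := by omega
            subst this; exact le_refl _
        exact le_antisymm (hje ▸ hle) (hmax _ hlm)
      -- A's flag2 computes True here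
      have hf2 : ((PySem.Dict.counter sx).values.foldl
          (fun f ele => if 1 < ele then false else f) true) = true := (flag2_iff sx).mpr hndsx
      -- A's flag1 is equivalent to B's span test
      have hstep_iff : (∀ i ∈ PySem.List.pyRange 1 (cs.length : Int) 1,
            ¬ (1 < |((PySem.List.pyGetD sx (i - 1) 'a').toNat : Int)
                    - ((PySem.List.pyGetD sx i 'a').toNat : Int)|))
          ↔ (∀ (k : Nat) (hk : k + 1 < sx.length),
              (sx[k + 1]'hk).toNat ≤ (sx[k]'(by omega)).toNat + 1) := by
        have habs : ∀ (k : Nat) (hk : k + 1 < sx.length),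
            |((PySem.List.pyGetD sx ((k : Int) + 1 - 1) 'a').toNat : Int)
              - ((PySem.List.pyGetD sx ((k : Int) + 1) 'a').toNat : Int)|
            = ((sx[k + 1]'hk).toNat : Int) - ((sx[k]'(by omega)).toNat : Int) := by
          intro k hk
          have e1 : ((k : Int) + 1 - 1) = ((k : Nat) : Int) := by ring
          have e2 : ((k : Int) + 1) = (((k + 1 : Nat)) : Int) := by push_cast; ring
          rw [e1, e2, PySem.List.pyGetD_natCast, PySem.List.pyGetD_natCast,
              List.getD_eq_getElem sx 'a' (by omega), List.getD_eq_getElem sx 'a' hk]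
          have := hmono k (k + 1) (by omega) hk (by omega)
          rw [abs_sub_comm]
          rw [abs_of_nonneg (by omega)]
        constructor
        · intro h k hk
          have hi : ((k : Int) + 1) ∈ PySem.List.pyRange 1 (cs.length : Int) 1 :=
            PySem.List.mem_pyRange_one.mpr (by omega)
          have hh := h _ hi
          rw [habs k hk] at hh
          omega
        · intro h i hi
          obtain ⟨hi1, hi2⟩ := PySem.List.mem_pyRange_one.mp hi
          obtain ⟨k, rfl, hk⟩ : ∃ k : Nat, i = (k : Int) + 1 ∧ k + 1 < sx.length :=
            ⟨(i - 1).toNat, by omega, by omega⟩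
          rw [habs k hk]
          have := h k hk
          omega
      have hspan_iff : (∀ (k : Nat) (hk : k + 1 < sx.length),
            (sx[k + 1]'hk).toNat ≤ (sx[k]'(by omega)).toNat + 1)
          ↔ ((mx.toNat : Int) - (mn.toNat : Int) = (cs.length : Int) - 1) := by
        have hml : ((sx.map Char.toNat).length) = sx.length := by simp
        have hnslt : (sx.map Char.toNat).Pairwise (· < ·) := by
          rw [List.pairwise_iff_getElem]
          intro i j hi hj hij
          simp only [List.getElem_map]
          exact hmono i j (by omega) (by omega) hij
        have hlow := steps_lower (sx.map Char.toNat) hnslt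
        constructor
        · intro h
          have hstep' : ∀ (k : Nat) (hk : k + 1 < (sx.map Char.toNat).length),
              (sx.map Char.toNat)[k + 1]'hk ≤ ((sx.map Char.toNat)[k]'(by omega)) + 1 := by
            intro k hk
            simp only [List.getElem_map]
            exact h k (by omega)
          have hup := steps_upper (sx.map Char.toNat) hstep' (sx.length - 1) 0 (by omega)
          have hlo := hlow (sx.length - 1) 0 (by omega)
          simp only [List.getElem_map, show 0 + (sx.length - 1) = sx.length - 1 from by omega] at hup hlo
          rw [hmn0, hmx0]
          omega
        · intro h k hk
          rw [hmn0, hmx0] at h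
          have h1 := hlow k 0 (by omega)
          have h2 := hlow (sx.length - 1 - (k + 1)) (k + 1) (by omega)
          simp only [List.getElem_map, show 0 + k = k from by omega,
            show k + 1 + (sx.length - 1 - (k + 1)) = sx.length - 1 from by omega] at h1 h2
          omega
      -- assemble
      show _ = if ((mx.toNat : Int) - (mn.toNat : Int) = (cs.length : Int) - 1) then "Yes" else "No"
      simp only [hlen, foldl_flag (fun i : Int =>
        (1 : Int) < |((PySem.List.pyGetD sx (i - 1) 'a').toNat : Int)
          - ((PySem.List.pyGetD sx i 'a').toNat : Int)|), hf2, Bool.and_true,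
        Bool.true_and]
      exact if_congr (by rw [decide_eq_true_eq]; exact hstep_iff.trans hspan_iff) rfl rfl
    · -- duplicates: A's flag2 is False, B's length test fires — both answer "No"
      have hBtest : (((PySem.Set.len (PySem.Set.ofList cs)) : Int) ≠ (cs.length : Int)) := by
        intro h
        have h' : ((PySem.Set.ofList cs).length : Int) = (cs.length : Int) := h
        exact hnd ((len_ofList_eq_iff cs).mp (by exact_mod_cast h'))
      rw [if_pos hBtest]
      have hndsx : ¬ (PySem.List.sorted cs (fun c => c) false).Nodup := by
        intro h
        exact hnd ((PySem.List.sorted_perm cs _ _).nodup_iff.mp h)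
      have hf2 : ((PySem.Dict.counter (PySem.List.sorted cs (fun c => c) false)).values.foldl
          (fun f ele => if 1 < ele then false else f) true) = false := by
        rcases Bool.eq_false_or_eq_true (((PySem.Dict.counter (PySem.List.sorted cs (fun c => c) false)).values.foldl
          (fun f ele => if 1 < ele then false else f) true)) with h | h
        · exact absurd ((flag2_iff _).mp h) hndsx
        · exact h
      simp only [hf2, Bool.and_false]
      rfl

-- ===== VERDICT (by name: the statement is the Claim_ definition above) =====
theorem diverse_string_spec : Claim_equal_diverse_string := by
  intro x _
  unfold Spec_diverse_string
  cases x with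
  | none => rfl
  | some s => exact diverse_string_key s
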